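-- pv_equiv track=rewrite | github.com/AsEsm/checkiO_tasks | ground_for_the_house.py | count
-- ===== SOURCE A (Python) =====
-- def count(data):
--     numb = 0
--     try:
--         while data[0].count('#') == 0:
--             data.pop(0)
--         while data[-1].count('#') == 0:
--             data.pop()
--     except:
--         return 0
--     for i in data:
--         numb +=1
--     return numb
-- ===== SOURCE B (Python) =====
-- def count(data):
--     idx = [i for i, row in enumerate(data) if '#' in row]
--     return idx[-1] - idx[0] + 1 if idx else 0
-- ===== Notes on version B (the rewrite author's own statement) =====
-- stated objective: faster
-- what changed: Replaces A's destructive pop(0)/pop() while-loops plus a counting for-loop with a single enumerate pass collecting the indices of '#'-rows and returning last - first + 1 (B does not mutate its argument; A pops rows in place).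
import Mathlib
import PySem

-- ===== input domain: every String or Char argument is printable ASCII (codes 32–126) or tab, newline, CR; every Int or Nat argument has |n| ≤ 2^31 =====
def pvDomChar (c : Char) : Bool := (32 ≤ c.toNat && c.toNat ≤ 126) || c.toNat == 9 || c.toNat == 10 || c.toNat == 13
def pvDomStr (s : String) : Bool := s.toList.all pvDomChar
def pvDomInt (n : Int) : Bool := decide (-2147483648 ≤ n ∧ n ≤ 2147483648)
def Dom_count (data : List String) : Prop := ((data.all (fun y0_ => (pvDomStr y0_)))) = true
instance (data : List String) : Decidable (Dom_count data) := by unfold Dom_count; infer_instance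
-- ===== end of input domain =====

-- B replaces A's pop(0)/pop() trimming loops with one enumerate pass over the indices of
-- rows containing '#'; note A mutates its argument in place (pops rows), B does not —
-- the equivalence proved here is about the return value only.

-- ===== PORT A =====
-- first while loop: pop rows from the front while data[0] has no '#'; none = IndexError (caught, → return 0)
def frontA : List String → Option (List String)
  | [] => none
  | r :: rs => if PySem.Str.count r "#" = 0 then frontA rs else some (r :: rs)

-- second while loop: pop rows from the back while data[-1] has no '#'; none = IndexError (caught, → return 0)
def backA (l : List String) : Option (List String) :=
  match h : l.getLast? with
  | none => none
  | some r =>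
      if PySem.Str.count r "#" = 0 then backA l.dropLast else some l
termination_by l.length
decreasing_by
  have hne : l ≠ [] := by
    intro hnil; rw [hnil] at h; simp at h
  have := List.length_pos_of_ne_nil hne
  simp [List.length_dropLast]; omega

def count (data : List String) : Int :=
  match frontA data with
  | none => 0                                        -- except: return 0
  | some l1 =>
    match backA l1 with
    | none => 0                                      -- except: return 0
    | some l2 => l2.foldl (fun numb _ => numb + 1) 0 -- for i in data: numb += 1

-- ===== PORT B =====
def count_alt (data : List String) : Int :=
  let idx := ((PySem.List.enumerate data).filter (fun p => PySem.Str.isIn "#" p.2)).map (·.1)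
  match idx with
  | [] => 0
  | i :: rest => (i :: rest).getLastD 0 - i + 1

-- ===== PRECONDITION & SPEC =====
def Spec_count (data : List String) (out : Int) : Prop := out = count_alt data
instance (data : List String) (out : Int) : Decidable (Spec_count data out) := by unfold Spec_count; infer_instance

-- ===== CLAIM (what is proved, stated in full; the proofs are below) =====
def Claim_equal_count : Prop := ∀ (data : List String), Dom_count data → Spec_count data (count data)

-- ===== LEMMAS AND PROOFS =====

-- A's loop condition row.count('#') == 0 is the negation of B's '#' in row
theorem go_single (a : Char) : ∀ (fuel : Nat) (l : List Char) (acc : Nat), l.length ≤ fuel →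
    PySem.Chars.count.go [a] fuel l acc = acc + l.count a := by
  intro fuel
  induction fuel with
  | zero =>
    intro l acc h
    have : l = [] := by cases l <;> simp_all
    subst this; simp [PySem.Chars.count.go]
  | succ n ih =>
    intro l acc h
    cases l with
    | nil => simp [PySem.Chars.count.go]
    | cons x t =>
      rw [PySem.Chars.count.go]
      simp only [List.isPrefixOf, List.length_cons] at *
      by_cases hx : a = x
      · subst hx
        simp only [beq_self_eq_true, Bool.true_and, if_true]
        have hd : List.drop ((List.nil (α := Char)).length + 1) (a :: t) = t := by simp
        rw [hd, ih t (acc+1) (by omega), List.count_cons]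
        simp; omega
      · have : (a == x) = false := by simp [hx]
        simp only [this, Bool.false_and]
        rw [ih t acc (by omega), List.count_cons]
        simp [Ne.symm hx]

theorem cnt_iff (r : String) : (PySem.Str.count r "#" = 0) ↔ (PySem.Str.isIn "#" r = false) := by
  have h1 : PySem.Str.count r "#" = r.toList.count '#' := by
    rw [PySem.Str.count_eq]
    show PySem.Chars.count r.toList ['#'] = _
    rw [PySem.Chars.count]
    simp [go_single]
  rw [h1]
  rw [Bool.eq_false_iff, Ne, PySem.Str.isIn_iff_infix]
  show _ ↔ ¬ ['#'] <:+: r.toList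
  rw [List.singleton_infix_iff, List.count_eq_zero]

-- the index list B builds, generalized over the enumerate start
def idxL (s : Int) (l : List String) : List Int :=
  ((PySem.List.enumerate l s).filter (fun p => PySem.Str.isIn "#" p.2)).map (·.1)

theorem idxL_nil (s : Int) : idxL s [] = [] := by simp [idxL, PySem.List.enumerate_nil]

theorem idxL_cons (s : Int) (r : String) (rs : List String) :
    idxL s (r :: rs) = if PySem.Str.isIn "#" r then s :: idxL (s+1) rs else idxL (s+1) rs := by
  simp [idxL, PySem.List.enumerate_cons]
  split <;> simp_all

theorem idxL_shift (l : List String) : ∀ s : Int, idxL (s+1) l = (idxL s l).map (· + 1) := by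
  induction l with
  | nil => intro s; simp [idxL_nil]
  | cons r rs ih =>
    intro s
    rw [idxL_cons, idxL_cons, ih (s+1)]
    split <;> simp

theorem idxL_concat (a : String) : ∀ (l : List String) (s : Int),
    idxL s (l ++ [a]) = idxL s l ++ (if PySem.Str.isIn "#" a then [s + l.length] else []) := by
  intro l
  induction l with
  | nil =>
    intro s
    rw [List.nil_append, idxL_cons, idxL_nil]
    split <;> simp [idxL_nil]
  | cons r rs ih =>
    intro s
    rw [List.cons_append, idxL_cons, idxL_cons, ih (s+1)]
    split <;> · simp; try ring_nf

-- B's last-first+1 formula, and its invariance under shifting all indices by 1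
def gB (idx : List Int) : Int :=
  match idx with
  | [] => 0
  | i :: rest => (i :: rest).getLastD 0 - i + 1

theorem gB_shift (idx : List Int) : gB (idx.map (· + 1)) = gB idx := by
  cases idx with
  | nil => rfl
  | cons i t =>
    have key : ∀ (u : List Int) (i : Int), ((i :: u).map (· + 1)).getLastD 0 = (i :: u).getLastD 0 + 1 := by
      intro u
      induction u with
      | nil => intro i; rfl
      | cons j t ih => intro i; simpa using ih j
    simp only [gB, List.map_cons]
    have := key t i
    simp only [List.map_cons] at this
    rw [this]
    ring

theorem count_alt_eq (data : List String) : count_alt data = gB (idxL 0 data) := rfl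

theorem foldl_len (l : List String) : ∀ c : Int, l.foldl (fun n _ => n + 1) c = c + l.length := by
  induction l with
  | nil => intro c; simp
  | cons x t ih => intro c; simp [List.foldl_cons, ih (c+1)]; ring

theorem backA_concat_pos (m : List String) (a : String) (hc : ¬ PySem.Str.count a "#" = 0) :
    backA (m ++ [a]) = some (m ++ [a]) := by
  rw [backA]
  split
  · next heq => rw [List.getLast?_concat] at heq; exact absurd heq (by simp)
  · next r heq =>
    rw [List.getLast?_concat] at heq
    have : a = r := by injection heq
    subst this
    rw [if_neg hc]

theorem backA_concat_neg (m : List String) (a : String) (hc : PySem.Str.count a "#" = 0) :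
    backA (m ++ [a]) = backA m := by
  rw [backA]
  split
  · next heq => rw [List.getLast?_concat] at heq; exact absurd heq (by simp)
  · next r heq =>
    rw [List.getLast?_concat] at heq
    have : a = r := by injection heq
    subst this
    rw [if_pos hc, List.dropLast_concat]

-- when some row has a '#', the back loop returns, and the length of its result
-- is the last '#'-row index + 1
theorem backA_of_hash (l : List String) (hw : ∃ e ∈ l, PySem.Str.isIn "#" e = true) :
    ∃ l2, backA l = some l2 ∧ (l2.length : Int) = (idxL 0 l).getLastD 0 + 1 := by
  induction l using List.reverseRecOn with
  | nil => simp at hw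
  | append_singleton m a ih =>
    by_cases hb : PySem.Str.isIn "#" a = true
    · have hc : ¬ PySem.Str.count a "#" = 0 := by
        intro h0; rw [cnt_iff, hb] at h0; simp at h0
      refine ⟨m ++ [a], backA_concat_pos m a hc, ?_⟩
      rw [idxL_concat a m 0, if_pos hb, List.getLastD_concat]
      simp
    · have hc : PySem.Str.count a "#" = 0 := by
        rw [cnt_iff]; exact Bool.eq_false_iff.mpr (fun h => hb h)
      obtain ⟨e, he, hpe⟩ := hw
      rcases List.mem_append.mp he with hm | ha
      · obtain ⟨l2, h1, h2⟩ := ih ⟨e, hm, hpe⟩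
        refine ⟨l2, by rw [backA_concat_neg m a hc, h1], ?_⟩
        rw [idxL_concat a m 0, if_neg hb, List.append_nil]
        exact h2
      · simp at ha; subst ha; rw [hpe] at hb; exact absurd rfl hb

theorem count_eq_alt (data : List String) : count data = count_alt data := by
  induction data with
  | nil => rfl
  | cons r rs ih =>
    by_cases hb : PySem.Str.isIn "#" r = true
    · have hc : ¬ PySem.Str.count r "#" = 0 := by
        intro h0; rw [cnt_iff, hb] at h0; simp at h0
      obtain ⟨l2, h1, h2⟩ := backA_of_hash (r :: rs) ⟨r, List.mem_cons_self, hb⟩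
      have hf : frontA (r :: rs) = some (r :: rs) := by rw [frontA, if_neg hc]
      rw [count_alt_eq, idxL_cons, if_pos hb]
      simp only [count, hf, h1]
      rw [foldl_len l2 0]
      rw [idxL_cons, if_pos hb] at h2
      simp only [gB]
      omega
    · have hc : PySem.Str.count r "#" = 0 := by
        rw [cnt_iff]; exact Bool.eq_false_iff.mpr (fun h => hb h)
      have hf : frontA (r :: rs) = frontA rs := by rw [frontA, if_pos hc]
      have hA : count (r :: rs) = count rs := by
        simp only [count, hf]
      have hB : count_alt (r :: rs) = count_alt rs := by
        rw [count_alt_eq, count_alt_eq, idxL_cons, if_neg hb, idxL_shift rs 0, gB_shift]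
      rw [hA, hB, ih]

-- ===== VERDICT (by name: the statement is the Claim_ definition above) =====
theorem count_spec : Claim_equal_count := by
  intro data _
  exact count_eq_alt data
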